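-- pv_equiv track=rewrite | github.com/cyh924417122/mc1004fenxi | generate_checksum.py | generate_digit_permutation_map
-- ===== SOURCE A (Python) =====
-- def generate_digit_permutation_map(input_seed, out_map):
--     # 如果种子直接被模数整除，则用997避免全0序列
--     if not (input_seed % 0x14DB3):
--         input_seed = 997
--
--     # 生成10个伪随机值（线性同余PRNG）
--     rand_values = []
--     for i in range(10):
--         input_seed = 997 * input_seed % 0x14DB3
--         rand_values.append(input_seed)
--
--     # 初始化映射位置计数
--     for i in range(10):
--         out_map[i] = 0
--
--     # 计算"排名"（0..9）: 值越小排名越小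
--     for i in range(10):
--         for j in range(i + 1, 10):
--             if rand_values[i] >= rand_values[j]:
--                 out_map[j] += 1
--             else:
--                 out_map[i] += 1
--
--     return input_seed
-- ===== SOURCE B (Python) =====
-- def generate_digit_permutation_map(input_seed, out_map):
--     M = 0x14DB3
--     # closed-form LCG: the i-th value is seed0 * 997**i (mod M)
--     s0 = 997 if input_seed % M == 0 else input_seed % M
--     rand_values = [s0 * pow(997, i, M) % M for i in range(1, 11)]
--     # rank by sorting indices by (-value, index); enumerate assigns rank p to index k
--     for p, k in enumerate(sorted(range(10), key=lambda k: (-rand_values[k], k))):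
--         out_map[k] = p
--     return rand_values[-1]
-- ===== Notes on version B (the rewrite author's own statement) =====
-- stated objective: alternative
-- what changed: The ten-step running-seed LCG loop is replaced by the closed modular form seed0*pow(997,i,M)%M computed per index, and the O(n^2) nested pairwise-comparison ranking is replaced by one sort of the indices by (-value, index) plus a single enumerate pass writing each rank; the return value is the last generated value.
import Mathlib
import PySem

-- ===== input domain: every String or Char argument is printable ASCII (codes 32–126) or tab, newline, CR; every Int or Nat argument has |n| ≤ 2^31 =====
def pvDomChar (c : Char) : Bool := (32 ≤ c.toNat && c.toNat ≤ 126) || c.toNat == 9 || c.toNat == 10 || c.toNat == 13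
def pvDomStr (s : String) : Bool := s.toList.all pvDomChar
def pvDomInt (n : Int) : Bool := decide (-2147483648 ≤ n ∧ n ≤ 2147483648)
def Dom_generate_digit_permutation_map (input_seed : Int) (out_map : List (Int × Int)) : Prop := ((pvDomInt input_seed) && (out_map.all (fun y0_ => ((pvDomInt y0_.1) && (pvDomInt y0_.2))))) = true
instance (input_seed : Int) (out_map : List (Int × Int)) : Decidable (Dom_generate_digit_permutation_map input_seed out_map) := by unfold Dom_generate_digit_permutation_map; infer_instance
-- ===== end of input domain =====

-- B replaces the ten-step LCG iteration + nested pairwise ranking by the closed modular form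
-- seed0*997^i mod M for the values and a sort-by-(-value,index) + enumerate pass for the ranks
-- (alternative decomposition); both versions mutate out_map in Python with the same final contents,
-- and the equivalence proved here is about the RETURN value only (the final seed).


-- ===== PORT A =====
-- Literal port of A: the dict out_map is mutated in Python; the function RETURNS the final seed,
-- so the dict-filling loops are transcribed but their result does not enter the return value.
def generate_digit_permutation_map (input_seed : Int) (out_map : List (Int × Int)) : Int :=
  let seed0 : Int := if PySem.Int.mod input_seed 85427 == 0 then 997 else input_seed
  -- for i in range(10): input_seed = 997*input_seed % 0x14DB3; rand_values.append(input_seed)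
  let sv : Int × List Int :=
    (PySem.List.pyRange 0 10 1).foldl
      (fun p _ =>
        let s := PySem.Int.mod (997 * p.1) 85427
        (s, p.2 ++ [s])) (seed0, [])
  let rand_values := sv.2
  -- for i in range(10): out_map[i] = 0
  let d0 : PySem.Dict Int Int :=
    (PySem.List.pyRange 0 10 1).foldl (fun d i => d.insert i 0) (PySem.Dict.mk out_map)
  -- nested pairwise loop: for i in range(10): for j in range(i+1, 10): …
  let _dfinal : PySem.Dict Int Int :=
    (PySem.List.pyRange 0 10 1).foldl
      (fun d i =>
        (PySem.List.pyRange (i + 1) 10 1).foldl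
          (fun d j =>
            if PySem.List.pyGetD rand_values j 0 ≤ PySem.List.pyGetD rand_values i 0 then
              d.insert j (d.getD j 0 + 1)
            else
              d.insert i (d.getD i 0 + 1)) d) d0
  sv.1

-- ===== PORT B =====
-- Port of Source B: closed-form values s0 * pow(997, i, M) % M for i in 1..10 (a map, no running seed),
-- ranks written by one enumerate pass over the sorted index list, return rand_values[-1].
def generate_digit_permutation_map_alt (input_seed : Int) (out_map : List (Int × Int)) : Int :=
  let M : Int := 85427
  let s0 : Int := if PySem.Int.mod input_seed M == 0 then 997 else PySem.Int.mod input_seed M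
  let rand_values : List Int :=
    (PySem.List.pyRange 1 11 1).map (fun i => PySem.Int.mod (s0 * PySem.Int.powMod 997 i.toNat M) M)
  -- for p, k in enumerate(sorted(range(10), key=lambda k: (-rand_values[k], k))): out_map[k] = p
  let _dfinal : PySem.Dict Int Int :=
    (PySem.List.enumerate (PySem.List.sorted2 (PySem.List.pyRange 0 10 1)
        (fun k => -(PySem.List.pyGetD rand_values k 0)) (fun k => k) false)).foldl
      (fun d pk => d.insert pk.2 pk.1) (PySem.Dict.mk out_map)
  -- rand_values always has 10 elements, so rand_values[-1] never raises; getD is exact here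
  (PySem.List.pyGet? rand_values (-1)).getD 0

-- ===== PRECONDITION & SPEC =====
def Spec_generate_digit_permutation_map (input_seed : Int) (out_map : List (Int × Int)) (out : Int) : Prop := out = generate_digit_permutation_map_alt input_seed out_map
instance (input_seed : Int) (out_map : List (Int × Int)) (out : Int) : Decidable (Spec_generate_digit_permutation_map input_seed out_map out) := by unfold Spec_generate_digit_permutation_map; infer_instance

-- ===== CLAIM (what is proved, stated in full; the proofs are below) =====
def Claim_equal_generate_digit_permutation_map : Prop := ∀ (input_seed : Int) (out_map : List (Int × Int)), Dom_generate_digit_permutation_map input_seed out_map → Spec_generate_digit_permutation_map input_seed out_map (generate_digit_permutation_map input_seed out_map)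

-- ===== LEMMAS AND PROOFS =====

-- (a * (x % M)) % M = (a * x) % M  (absorb an inner emod)
theorem pv_mul_emod_right (a x M : Int) : (a * (x % M)) % M = (a * x) % M := by
  rw [Int.mul_emod, Int.emod_emod_of_dvd x dvd_rfl, ← Int.mul_emod]

theorem pv_mul_emod_left (a x M : Int) : ((x % M) * a) % M = (x * a) % M := by
  rw [Int.mul_emod, Int.emod_emod_of_dvd x dvd_rfl, ← Int.mul_emod]

-- ===== VERDICT (by name: the statement is the Claim_ definition above) =====
theorem generate_digit_permutation_map_spec : Claim_equal_generate_digit_permutation_map := by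
  intro input_seed out_map _
  unfold Spec_generate_digit_permutation_map generate_digit_permutation_map generate_digit_permutation_map_alt
  have hr0 : PySem.List.pyRange 0 10 1 = [0,1,2,3,4,5,6,7,8,9] := by decide
  have hr1 : PySem.List.pyRange 1 11 1 = [1,2,3,4,5,6,7,8,9,10] := by decide
  have hp : PySem.Int.powMod 997 (Int.toNat 10) 85427 = 997^10 % 85427 := by decide
  rw [hr0, hr1]
  simp only [List.foldl, List.map, PySem.List.pyGet?_neg_one, List.getLast?, Option.getD,
    PySem.Int.mod_eq_emod_of_pos (show (0:Int) < 85427 by norm_num), hp]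
  by_cases h : input_seed % 85427 = 0
  · simp only [h]
    norm_num
  · have hb : (input_seed % 85427 == 0) = false := by simpa using h
    simp only [hb, if_false, Bool.false_eq_true]
    simp only [pv_mul_emod_right, pv_mul_emod_left]
    congr 1
    ring
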